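-- pv_equiv track=rewrite | github.com/jims228/Shogi_AI_Learning | backend/api/test_opening_castle_detector.py | board_part_from_placements
-- ===== SOURCE A (Python) =====
-- def board_part_from_placements(placements):
--     """
--     placements: list of (pieceChar, file, rank)
--       - file: 1..9 (right->left)
--       - rank: 1..9 (top->bottom)
--     pieceChar: 'K','k','R','r','G','g','S','s', etc
--     """
--     board = [[None for _ in range(9)] for _ in range(9)]
--     for piece, file_, rank_ in placements:
--         x = 9 - int(file_)
--         y = int(rank_) - 1
--         board[y][x] = piece
--
--     rows = []
--     for y in range(9):
--         run = 0
--         parts = []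
--         for x in range(9):
--             p = board[y][x]
--             if p is None:
--                 run += 1
--             else:
--                 if run:
--                     parts.append(str(run))
--                     run = 0
--                 parts.append(p)
--         if run:
--             parts.append(str(run))
--         rows.append("".join(parts) if parts else "9")
--     return "/".join(rows)
-- ===== SOURCE B (Python) =====
-- def _leading_empty(cells):
--     if cells and cells[0] is None:
--         return 1 + _leading_empty(cells[1:])
--     return 0
--
--
-- def _compress(cells):
--     # recursively render a rank: pieces verbatim, maximal runs of empties as their length
--     if not cells:
--         return ""
--     if cells[0] is not None:
--         return cells[0] + _compress(cells[1:])
--     k = _leading_empty(cells)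
--     return str(k) + _compress(cells[k:])
--
--
-- def board_part_from_placements(placements):
--     ranks = [[None] * 9 for _ in range(9)]
--     for piece, file_, rank_ in placements:
--         ranks[int(rank_) - 1][9 - int(file_)] = piece
--     return "/".join(_compress(rank) for rank in ranks)
-- ===== Notes on version B (the rewrite author's own statement) =====
-- stated objective: simpler
-- what changed: B keeps the scatter into the 9x9 grid but replaces A's per-rank run-counter/flush/'9'-fallback serializer state machine by a short recursive run-length renderer over each rank list.
import Mathlib
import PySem

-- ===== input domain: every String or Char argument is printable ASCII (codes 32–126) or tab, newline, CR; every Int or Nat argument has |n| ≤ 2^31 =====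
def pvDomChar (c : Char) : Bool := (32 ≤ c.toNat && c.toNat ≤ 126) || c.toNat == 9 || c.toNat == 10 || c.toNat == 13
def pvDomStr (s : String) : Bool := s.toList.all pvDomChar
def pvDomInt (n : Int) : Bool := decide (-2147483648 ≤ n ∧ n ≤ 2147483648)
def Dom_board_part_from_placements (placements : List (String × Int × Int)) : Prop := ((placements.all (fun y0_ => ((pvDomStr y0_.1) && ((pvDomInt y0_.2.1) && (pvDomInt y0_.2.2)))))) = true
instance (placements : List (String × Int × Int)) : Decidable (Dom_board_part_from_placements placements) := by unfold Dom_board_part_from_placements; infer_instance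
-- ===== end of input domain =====

-- B replaces A's per-rank run-counter/flush/'9'-fallback serializer state machine by a short
-- recursive run-length renderer over each rank list (objective: simpler).

-- ===== PORT A =====
-- board[y][x] = piece / board[y][x] are ported with the total forms pyGetD/pySetD, exact
-- under Pre_ (all indices in range); where Python would raise IndexError, Pre_ excludes.
def pvStepA (b : List (List (Option String))) (pl : String × Int × Int) : List (List (Option String)) :=
  let x : Int := 9 - pl.2.1
  let y : Int := pl.2.2 - 1
  PySem.List.pySetD b y (PySem.List.pySetD (PySem.List.pyGetD b y []) x (some pl.1))

def pvCellStep (st : Int × List String) (p : Option String) : Int × List String :=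
  match p with
  | none => (st.1 + 1, st.2)
  | some s => (0, (if st.1 ≠ 0 then st.2 ++ [PySem.Int.toStr st.1] else st.2) ++ [s])

def pvRowStepA (board : List (List (Option String))) (y : Int) (st : Int × List String) (x : Int) :
    Int × List String :=
  pvCellStep st (PySem.List.pyGetD (PySem.List.pyGetD board y []) x none)

def board_part_from_placements (placements : List (String × Int × Int)) : String :=
  let board := placements.foldl pvStepA
    ((PySem.List.pyRange 0 9 1).map (fun _ => (PySem.List.pyRange 0 9 1).map (fun _ => (none : Option String))))
  let rows := (PySem.List.pyRange 0 9 1).foldl (fun rows y =>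
    let st := (PySem.List.pyRange 0 9 1).foldl (pvRowStepA board y) (0, [])
    let parts := if st.1 ≠ 0 then st.2 ++ [PySem.Int.toStr st.1] else st.2
    rows ++ [if parts = [] then "9" else PySem.Str.join "" parts]) []
  PySem.Str.join "/" rows

-- ===== PORT B =====
def pvLeadingEmpty : List (Option String) → Nat
  | none :: rest => 1 + pvLeadingEmpty rest
  | _ => 0

-- termination helper for pvCompress (cited in its decreasing_by)
theorem pvDropLt (rest : List (Option String)) (k : Nat) (hk : 0 < k) :
    (List.drop k ((none : Option String) :: rest)).length < ((none : Option String) :: rest).length := by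
  simp only [List.length_drop, List.length_cons]; omega

-- cells[k:] with 0 ≤ k ≤ len(cells) is exactly List.drop k
def pvCompress : List (Option String) → String
  | [] => ""
  | some p :: rest => p ++ pvCompress rest
  | none :: rest =>
    let k := pvLeadingEmpty (none :: rest)
    PySem.Int.toStr (k : Int) ++ pvCompress ((none :: rest).drop k)
  termination_by cells => cells.length
  decreasing_by
    all_goals try exact Nat.lt_succ_of_le (Nat.le_refl _)
    exact pvDropLt rest _ (by show 0 < 1 + pvLeadingEmpty rest; omega)

-- ranks[rank_-1][9-file_] = piece is ported with pyGetD/pySetD like in port A (exact under Pre_)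
def board_part_from_placements_alt (placements : List (String × Int × Int)) : String :=
  let ranks := placements.foldl (fun rs pl =>
    PySem.List.pySetD rs (pl.2.2 - 1)
      (PySem.List.pySetD (PySem.List.pyGetD rs (pl.2.2 - 1) []) (9 - pl.2.1) (some pl.1)))
    ((PySem.List.pyRange 0 9 1).map (fun _ => List.replicate 9 (none : Option String)))
  PySem.Str.join "/" (ranks.map pvCompress)

-- ===== PRECONDITION & SPEC =====
-- Pre_ admits exactly the inputs A returns on: every computed list index 9-file / rank-1
-- must lie in Python's accepted range [-9, 8] (negative indices wrap), i.e. file 1..18 and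
-- rank -8..9; outside it A raises IndexError.
def Pre_board_part_from_placements (placements : List (String × Int × Int)) : Prop :=
  ∀ pl ∈ placements, 1 ≤ pl.2.1 ∧ pl.2.1 ≤ 18 ∧ -8 ≤ pl.2.2 ∧ pl.2.2 ≤ 9
instance (placements : List (String × Int × Int)) : Decidable (Pre_board_part_from_placements placements) := by
  unfold Pre_board_part_from_placements; infer_instance
def pvWitness_board_part_from_placements : (List (String × Int × Int)) :=
  [("K", 5, 1), ("r", 1, 9), ("G", 5, 1)]

def Spec_board_part_from_placements (placements : List (String × Int × Int)) (out : String) : Prop := out = board_part_from_placements_alt placements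
instance (placements : List (String × Int × Int)) (out : String) : Decidable (Spec_board_part_from_placements placements out) := by unfold Spec_board_part_from_placements; infer_instance

-- ===== CLAIM (what is proved, stated in full; the proofs are below) =====
def Claim_equal_board_part_from_placements : Prop := ∀ (placements : List (String × Int × Int)), Dom_board_part_from_placements placements → Pre_board_part_from_placements placements → Spec_board_part_from_placements placements (board_part_from_placements placements)

-- ===== LEMMAS AND PROOFS =====

-- the parts A's run-counter loop emits, given a pending run and the remaining cells
def pvAux : Int → List (Option String) → List String
  | run, [] => if run ≠ 0 then [PySem.Int.toStr run] else []
  | run, none :: rest => pvAux (run + 1) rest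
  | run, some s :: rest => (if run ≠ 0 then [PySem.Int.toStr run] else []) ++ s :: pvAux 0 rest

theorem pvFold (cells : List (Option String)) : ∀ (run : Int) (parts : List String),
    (if (cells.foldl pvCellStep (run, parts)).1 ≠ 0
      then (cells.foldl pvCellStep (run, parts)).2 ++ [PySem.Int.toStr (cells.foldl pvCellStep (run, parts)).1]
      else (cells.foldl pvCellStep (run, parts)).2) = parts ++ pvAux run cells := by
  induction cells with
  | nil =>
    intro run parts
    simp only [List.foldl_nil, pvAux]
    split_ifs <;> simp
  | cons c rest ih =>
    intro run parts
    cases c with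
    | none => simpa only [List.foldl_cons, pvCellStep, pvAux] using ih (run + 1) parts
    | some s =>
      simp only [List.foldl_cons, pvCellStep, pvAux]
      rw [ih 0 _]
      split_ifs <;> simp

theorem pvAux_ne_nil (cells : List (Option String)) : ∀ (run : Int), 0 ≤ run →
    cells ≠ [] → pvAux run cells ≠ [] := by
  induction cells with
  | nil => intro run _ h; exact absurd rfl h
  | cons c rest ih =>
    intro run hrun _
    cases c with
    | none =>
      cases rest with
      | nil =>
        simp only [pvAux]
        have : run + 1 ≠ 0 := by omega
        simp [this]
      | cons d r => exact ih (run + 1) (by omega) (by simp)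
    | some s => simp [pvAux]

theorem pvJoinNil : PySem.Str.join "" ([] : List String) = "" := by
  apply String.toList_inj.mp
  simp [PySem.Str.toList_join, PySem.Chars.join_nil]

theorem pvJoinEmptyCons (s : String) (l : List String) :
    PySem.Str.join "" (s :: l) = s ++ PySem.Str.join "" l := by
  apply String.toList_inj.mp
  cases l with
  | nil => simp [PySem.Str.toList_join, PySem.Chars.join_nil, PySem.Chars.join_singleton]
  | cons t l' =>
    simp [PySem.Str.toList_join, PySem.Chars.join_cons_cons]

-- re-glue a rendered tail after a (possibly empty) run of empties
theorem pvCstep (rest : List (Option String)) :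
    (if (pvLeadingEmpty rest : Int) = 0 then "" else PySem.Int.toStr (pvLeadingEmpty rest : Int))
      ++ pvCompress (rest.drop (pvLeadingEmpty rest)) = pvCompress rest := by
  cases rest with
  | nil => simp [pvLeadingEmpty, pvCompress, String.empty_append]
  | cons c r =>
    cases c with
    | some s => simp [pvLeadingEmpty, pvCompress, String.empty_append]
    | none =>
      have h : (pvLeadingEmpty (none :: r) : Int) ≠ 0 := by
        have : 0 < pvLeadingEmpty (none :: r) := by
          show 0 < 1 + pvLeadingEmpty r; omega
        omega
      rw [if_neg h]
      conv_rhs => rw [pvCompress]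

theorem pvQ (cells : List (Option String)) : ∀ (run : Int), 0 ≤ run →
    PySem.Str.join "" (pvAux run cells) =
      (if run + (pvLeadingEmpty cells : Int) = 0 then "" else PySem.Int.toStr (run + (pvLeadingEmpty cells : Int)))
        ++ pvCompress (cells.drop (pvLeadingEmpty cells)) := by
  induction cells with
  | nil =>
    intro run hrun
    by_cases h : run = 0
    · simp [h, pvAux, pvLeadingEmpty, pvCompress, pvJoinNil, String.empty_append]
    · simp only [pvAux, pvLeadingEmpty, if_neg, h, ne_eq, not_false_iff, if_pos]
      rw [pvJoinEmptyCons, pvJoinNil]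
      simp [h, pvCompress, String.append_empty]
  | cons c rest ih =>
    intro run hrun
    cases c with
    | none =>
      have hlead : pvLeadingEmpty ((none : Option String) :: rest) = 1 + pvLeadingEmpty rest := rfl
      have hdrop : ((none : Option String) :: rest).drop (1 + pvLeadingEmpty rest) = rest.drop (pvLeadingEmpty rest) := by
        rw [Nat.add_comm, List.drop_succ_cons]
      have hcast : run + ((1 + pvLeadingEmpty rest : Nat) : Int) = (run + 1) + (pvLeadingEmpty rest : Int) := by
        push_cast; ring
      rw [show pvAux run ((none : Option String) :: rest) = pvAux (run + 1) rest from rfl,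
        ih (run + 1) (by omega), hlead, hdrop, hcast]
    | some s =>
      have hlead : pvLeadingEmpty ((some s : Option String) :: rest) = 0 := rfl
      rw [hlead]
      simp only [Nat.cast_zero, add_zero, List.drop_zero]
      have hrest : PySem.Str.join "" (pvAux 0 rest) = pvCompress rest := by
        rw [ih 0 le_rfl]
        simpa using pvCstep rest
      have hcomp : pvCompress ((some s : Option String) :: rest) = s ++ pvCompress rest := by
        rw [pvCompress]
      by_cases h : run = 0
      · simp only [h, ne_eq, not_true, ite_false, if_neg]
        rw [show pvAux (0 : Int) ((some s : Option String) :: rest) = s :: pvAux 0 rest by simp [pvAux],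
          pvJoinEmptyCons, hrest, hcomp]
        simp [String.empty_append]
      · rw [show pvAux run ((some s : Option String) :: rest) = PySem.Int.toStr run :: s :: pvAux 0 rest by simp [pvAux, h],
          pvJoinEmptyCons, pvJoinEmptyCons, hrest, if_neg h, hcomp]

-- A's serializer of one rank equals B's recursive renderer
theorem pvRowEq (cells : List (Option String)) :
    (if (cells.foldl pvCellStep ((0 : Int), ([] : List String))).1 ≠ 0
      then (cells.foldl pvCellStep ((0 : Int), ([] : List String))).2 ++ [PySem.Int.toStr (cells.foldl pvCellStep ((0 : Int), ([] : List String))).1]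
      else (cells.foldl pvCellStep ((0 : Int), ([] : List String))).2) = pvAux 0 cells ∧
    PySem.Str.join "" (pvAux 0 cells) = pvCompress cells := by
  refine ⟨by simpa using pvFold cells 0 [], ?_⟩
  rw [pvQ cells 0 le_rfl]
  simpa using pvCstep cells

def pvInv (b : List (List (Option String))) : Prop :=
  b.length = 9 ∧ ∀ y : Nat, y < 9 → (b.getD y []).length = 9

theorem pvPyGetD_nonneg {α : Type} (l : List α) (i : Int) (d : α) (hi : 0 ≤ i) :
    PySem.List.pyGetD l i d = l.getD i.toNat d := by
  conv_lhs => rw [show i = ((i.toNat : Nat) : Int) by omega]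
  rw [PySem.List.pyGetD_natCast]

theorem pvGetD_set {α : Type} (l : List α) (i j : Nat) (a d : α) (hi : i < l.length) :
    (l.set i a).getD j d = if i = j then a else l.getD j d := by
  rw [List.getD_eq_getElem?_getD, List.getElem?_set]
  by_cases h : i = j
  · subst h; simp [hi]
  · rw [if_neg h, ← List.getD_eq_getElem?_getD]
    simp [h]

theorem pvGetD_wrap {α : Type} (l : List α) (i : Int) (d : α) (hlen : l.length = 9)
    (h1 : -9 ≤ i) (h2 : i < 9) : PySem.List.pyGetD l i d = l.getD (i % 9).toNat d := by
  unfold PySem.List.pyGetD PySem.List.pyGet? PySem.List.pyIdx?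
  rw [hlen, List.getD_eq_getElem?_getD,
    List.getElem?_eq_getElem (show (i % 9).toNat < l.length by omega)]
  split_ifs <;> simp_all <;> congr 1 <;> omega

theorem pvSetD_wrap {α : Type} (l : List α) (i : Int) (v : α) (hlen : l.length = 9)
    (h1 : -9 ≤ i) (h2 : i < 9) : PySem.List.pySetD l i v = l.set (i % 9).toNat v := by
  unfold PySem.List.pySetD PySem.List.pySet? PySem.List.pyIdx?
  rw [hlen]
  split_ifs <;> simp_all <;> congr 1 <;> omega

theorem pvInvStep (pl : String × Int × Int)
    (hf : 1 ≤ pl.2.1 ∧ pl.2.1 ≤ 18 ∧ -8 ≤ pl.2.2 ∧ pl.2.2 ≤ 9)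
    (b : List (List (Option String))) (h : pvInv b) : pvInv (pvStepA b pl) := by
  obtain ⟨hlen, hrows⟩ := h
  have hy0b : ((pl.2.2 - 1) % 9).toNat < 9 := by omega
  have hx0b : ((9 - pl.2.1) % 9).toNat < 9 := by omega
  have hrow0 : (b.getD ((pl.2.2 - 1) % 9).toNat []).length = 9 := hrows _ hy0b
  have hstep : pvStepA b pl =
      b.set ((pl.2.2 - 1) % 9).toNat ((b.getD ((pl.2.2 - 1) % 9).toNat []).set ((9 - pl.2.1) % 9).toNat (some pl.1)) := by
    show PySem.List.pySetD b (pl.2.2 - 1)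
        (PySem.List.pySetD (PySem.List.pyGetD b (pl.2.2 - 1) []) (9 - pl.2.1) (some pl.1)) = _
    rw [pvGetD_wrap b _ _ hlen (by omega) (by omega),
      pvSetD_wrap _ _ _ hrow0 (by omega) (by omega),
      pvSetD_wrap b _ _ hlen (by omega) (by omega)]
  rw [hstep]
  refine ⟨by simpa using hlen, ?_⟩
  intro y hy
  rw [pvGetD_set b _ _ _ _ (by omega)]
  by_cases hEq : ((pl.2.2 - 1) % 9).toNat = y
  · rw [if_pos hEq]
    simpa using hrow0
  · rw [if_neg hEq]
    exact hrows y hy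

theorem pvInvFold (pls : List (String × Int × Int))
    (hb : ∀ pl ∈ pls, 1 ≤ pl.2.1 ∧ pl.2.1 ≤ 18 ∧ -8 ≤ pl.2.2 ∧ pl.2.2 ≤ 9) :
    ∀ b, pvInv b → pvInv (pls.foldl pvStepA b) := by
  induction pls with
  | nil => intro b h; simpa using h
  | cons pl rest ih =>
    intro b h
    simp only [List.foldl_cons]
    exact ih (fun q hq => hb q (by simp [hq])) _ (pvInvStep pl (hb pl (by simp)) b h)

theorem pvInv0 : pvInv ((PySem.List.pyRange 0 9 1).map (fun _ => (PySem.List.pyRange 0 9 1).map (fun _ => (none : Option String)))) := by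
  refine ⟨by decide, ?_⟩
  have h : ∀ y < 9,
      (((PySem.List.pyRange 0 9 1).map (fun _ => (PySem.List.pyRange 0 9 1).map (fun _ => (none : Option String)))).getD y []).length = 9 := by decide
  exact h

theorem pvRowValEq (b : List (List (Option String)))
    (hrows : ∀ y : Nat, y < 9 → (b.getD y []).length = 9)
    (y : Int) (hy0 : 0 ≤ y) (hy9 : y < 9) :
    (if (if ((PySem.List.pyRange 0 9 1).foldl (pvRowStepA b y) ((0 : Int), ([] : List String))).1 ≠ 0
          then ((PySem.List.pyRange 0 9 1).foldl (pvRowStepA b y) ((0 : Int), ([] : List String))).2 ++ [PySem.Int.toStr ((PySem.List.pyRange 0 9 1).foldl (pvRowStepA b y) ((0 : Int), ([] : List String))).1]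
          else ((PySem.List.pyRange 0 9 1).foldl (pvRowStepA b y) ((0 : Int), ([] : List String))).2) = []
      then "9"
      else PySem.Str.join ""
        (if ((PySem.List.pyRange 0 9 1).foldl (pvRowStepA b y) ((0 : Int), ([] : List String))).1 ≠ 0
          then ((PySem.List.pyRange 0 9 1).foldl (pvRowStepA b y) ((0 : Int), ([] : List String))).2 ++ [PySem.Int.toStr ((PySem.List.pyRange 0 9 1).foldl (pvRowStepA b y) ((0 : Int), ([] : List String))).1]
          else ((PySem.List.pyRange 0 9 1).foldl (pvRowStepA b y) ((0 : Int), ([] : List String))).2))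
    = pvCompress (PySem.List.pyGetD b y []) := by
  have hylt : y.toNat < 9 := by omega
  have hb : PySem.List.pyGetD b y [] = b.getD y.toNat [] := pvPyGetD_nonneg b y [] hy0
  have hrl : (b.getD y.toNat []).length = 9 := hrows _ hylt
  have hfoldfun : pvRowStepA b y = fun st x => pvCellStep st (PySem.List.pyGetD (b.getD y.toNat []) x none) := by
    funext st x
    unfold pvRowStepA
    rw [hb]
  have hrange : PySem.List.pyRange 0 9 1 = PySem.List.pyRange 0 (((b.getD y.toNat []).length : Nat) : Int) 1 := by
    rw [hrl]; norm_num
  have hfold : (PySem.List.pyRange 0 9 1).foldl (pvRowStepA b y) ((0 : Int), ([] : List String))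
      = (b.getD y.toNat []).foldl pvCellStep ((0 : Int), ([] : List String)) := by
    rw [hfoldfun, hrange]
    exact PySem.List.foldl_pyRange_zero_pyGetD' (b.getD y.toNat []) none pvCellStep _
  rw [hfold, hb]
  obtain ⟨h1, h2⟩ := pvRowEq (b.getD y.toNat [])
  rw [h1, if_neg (pvAux_ne_nil _ 0 le_rfl (by intro hn; rw [hn] at hrl; simp at hrl))]
  exact h2

-- ===== VERDICT (by name: the statement is the Claim_ definition above) =====
theorem board_part_from_placements_spec : Claim_equal_board_part_from_placements := by
  intro pls _ hpre
  unfold Spec_board_part_from_placements board_part_from_placements board_part_from_placements_alt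
  simp only [PySem.List.foldl_append_singleton_eq_map, List.nil_append]
  rw [show ((PySem.List.pyRange 0 9 1).map (fun _ => List.replicate 9 (none : Option String)))
      = ((PySem.List.pyRange 0 9 1).map (fun _ => (PySem.List.pyRange 0 9 1).map (fun _ => (none : Option String)))) from by decide]
  obtain ⟨hlen, hrows⟩ := pvInvFold pls hpre
    ((PySem.List.pyRange 0 9 1).map (fun _ => (PySem.List.pyRange 0 9 1).map (fun _ => (none : Option String)))) pvInv0
  rw [show (fun rs pl => PySem.List.pySetD rs (pl.2.2 - 1)
      (PySem.List.pySetD (PySem.List.pyGetD rs (pl.2.2 - 1) []) (9 - pl.2.1) (some pl.1)))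
      = pvStepA from rfl]
  set bd := pls.foldl pvStepA
    ((PySem.List.pyRange 0 9 1).map (fun _ => (PySem.List.pyRange 0 9 1).map (fun _ => (none : Option String)))) with hbd
  congr 1
  rw [List.map_congr_left (fun y hy => pvRowValEq bd hrows y
      (PySem.List.mem_pyRange_one.mp hy).1 (PySem.List.mem_pyRange_one.mp hy).2)]
  rw [show (fun y => pvCompress (PySem.List.pyGetD bd y []))
      = pvCompress ∘ (fun y => PySem.List.pyGetD bd y []) from rfl, ← List.map_map]
  congr 1
  rw [show (9 : Int) = ((bd.length : Nat) : Int) from by rw [hlen]; norm_num]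
  exact PySem.List.map_pyGetD_pyRange_zero' bd []
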